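-- pv_equiv track=rewrite | github.com/armaan-hub/Analysis | backend/core/audit_profile_builder.py | _infer_group_from_name
-- ===== SOURCE A (Python) =====
-- from typing import Any, Optional
--
-- _GROUP_KEYWORDS: dict[str, list[str]] = {
--     "Revenue": ["revenue", "sales", "income from operations", "service income", "turnover",
--                 "commission received", "direct income", "indirect income"],
--     "Cost of Sales": ["cost of sales", "cost of goods", "cogs", "direct cost", "purchases"],
--     "Operating Expenses": [
--         "salary", "salaries", "wages", "rent", "depreciation", "amortization",
--         "utilities", "insurance", "travel", "office", "professional fees",
--         "marketing", "advertising", "communication", "repairs", "maintenance",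
--         "staff cost", "employee", "admin", "general expense", "operating expense",
--     ],
--     "Current Assets": [
--         "cash", "bank", "receivable", "inventory", "prepaid", "advance",
--         "deposit", "short-term", "trade receivable", "accounts receivable",
--     ],
--     "Non-Current Assets": [
--         "property", "plant", "equipment", "ppe", "intangible", "goodwill",
--         "investment property", "right-of-use", "long-term investment",
--         "fixed asset", "capital work",
--     ],
--     "Current Liabilities": [
--         "payable", "accrued", "provision", "short-term loan", "overdraft",
--         "trade payable", "accounts payable", "current portion",
--         "unearned revenue", "deferred revenue",
--     ],
--     "Non-Current Liabilities": [
--         "long-term loan", "lease liability", "bond", "debenture",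
--         "end of service", "employee benefit", "long-term provision",
--     ],
--     "Equity": [
--         "capital", "share capital", "retained earnings", "reserves",
--         "accumulated", "shareholder", "owner equity", "paid-up",
--     ],
--     "Other Income": ["other income", "interest income", "gain on", "dividend income"],
--     "Finance Costs": ["interest expense", "finance cost", "bank charge", "finance charge"],
-- }
--
-- def _infer_group_from_name(account_name: str) -> Optional[str]:
--     """Match account name to IFRS group using keyword patterns."""
--     name_lower = account_name.lower()
--
--     # Skip totals and subtotals
--     if name_lower.startswith("total") or name_lower.startswith("sub-total"):
--         return None
--
--     best_match: Optional[str] = None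
--     best_score = 0
--
--     for group, keywords in _GROUP_KEYWORDS.items():
--         for keyword in keywords:
--             if keyword in name_lower:
--                 score = len(keyword)  # Longer match = more specific
--                 if score > best_score:
--                     best_score = score
--                     best_match = group
--
--     return best_match
-- ===== SOURCE B (Python) =====
-- from typing import Optional
--
-- # Flat lookup table: (keyword, group) pairs, hand-ordered by keyword length
-- # descending (ties keep the original grouped-table order), so that the FIRST
-- # matching entry is always a longest (most specific) match.
-- _KEYWORD_TABLE = [
--     ('income from operations', 'Revenue'),
--     ('long-term investment', 'Non-Current Assets'),
--     ('commission received', 'Revenue'),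
--     ('accounts receivable', 'Current Assets'),
--     ('investment property', 'Non-Current Assets'),
--     ('long-term provision', 'Non-Current Liabilities'),
--     ('professional fees', 'Operating Expenses'),
--     ('operating expense', 'Operating Expenses'),
--     ('retained earnings', 'Equity'),
--     ('trade receivable', 'Current Assets'),
--     ('accounts payable', 'Current Liabilities'),
--     ('unearned revenue', 'Current Liabilities'),
--     ('deferred revenue', 'Current Liabilities'),
--     ('employee benefit', 'Non-Current Liabilities'),
--     ('interest expense', 'Finance Costs'),
--     ('indirect income', 'Revenue'),
--     ('general expense', 'Operating Expenses'),
--     ('short-term loan', 'Current Liabilities'),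
--     ('current portion', 'Current Liabilities'),
--     ('lease liability', 'Non-Current Liabilities'),
--     ('interest income', 'Other Income'),
--     ('dividend income', 'Other Income'),
--     ('service income', 'Revenue'),
--     ('long-term loan', 'Non-Current Liabilities'),
--     ('end of service', 'Non-Current Liabilities'),
--     ('finance charge', 'Finance Costs'),
--     ('direct income', 'Revenue'),
--     ('cost of sales', 'Cost of Sales'),
--     ('cost of goods', 'Cost of Sales'),
--     ('communication', 'Operating Expenses'),
--     ('trade payable', 'Current Liabilities'),
--     ('share capital', 'Equity'),
--     ('depreciation', 'Operating Expenses'),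
--     ('amortization', 'Operating Expenses'),
--     ('right-of-use', 'Non-Current Assets'),
--     ('capital work', 'Non-Current Assets'),
--     ('owner equity', 'Equity'),
--     ('other income', 'Other Income'),
--     ('finance cost', 'Finance Costs'),
--     ('direct cost', 'Cost of Sales'),
--     ('advertising', 'Operating Expenses'),
--     ('maintenance', 'Operating Expenses'),
--     ('fixed asset', 'Non-Current Assets'),
--     ('accumulated', 'Equity'),
--     ('shareholder', 'Equity'),
--     ('bank charge', 'Finance Costs'),
--     ('staff cost', 'Operating Expenses'),
--     ('receivable', 'Current Assets'),
--     ('short-term', 'Current Assets'),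
--     ('intangible', 'Non-Current Assets'),
--     ('purchases', 'Cost of Sales'),
--     ('utilities', 'Operating Expenses'),
--     ('insurance', 'Operating Expenses'),
--     ('marketing', 'Operating Expenses'),
--     ('inventory', 'Current Assets'),
--     ('equipment', 'Non-Current Assets'),
--     ('provision', 'Current Liabilities'),
--     ('overdraft', 'Current Liabilities'),
--     ('debenture', 'Non-Current Liabilities'),
--     ('turnover', 'Revenue'),
--     ('salaries', 'Operating Expenses'),
--     ('employee', 'Operating Expenses'),
--     ('property', 'Non-Current Assets'),
--     ('goodwill', 'Non-Current Assets'),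
--     ('reserves', 'Equity'),
--     ('revenue', 'Revenue'),
--     ('repairs', 'Operating Expenses'),
--     ('prepaid', 'Current Assets'),
--     ('advance', 'Current Assets'),
--     ('deposit', 'Current Assets'),
--     ('payable', 'Current Liabilities'),
--     ('accrued', 'Current Liabilities'),
--     ('capital', 'Equity'),
--     ('paid-up', 'Equity'),
--     ('gain on', 'Other Income'),
--     ('salary', 'Operating Expenses'),
--     ('travel', 'Operating Expenses'),
--     ('office', 'Operating Expenses'),
--     ('sales', 'Revenue'),
--     ('wages', 'Operating Expenses'),
--     ('admin', 'Operating Expenses'),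
--     ('plant', 'Non-Current Assets'),
--     ('cogs', 'Cost of Sales'),
--     ('rent', 'Operating Expenses'),
--     ('cash', 'Current Assets'),
--     ('bank', 'Current Assets'),
--     ('bond', 'Non-Current Liabilities'),
--     ('ppe', 'Non-Current Assets'),
-- ]
--
-- def _infer_group_from_name(account_name: str) -> Optional[str]:
--     """Match account name to IFRS group using keyword patterns."""
--     name_lower = account_name.lower()
--     if name_lower.startswith("total") or name_lower.startswith("sub-total"):
--         return None
--     for keyword, group in _KEYWORD_TABLE:
--         if keyword in name_lower:
--             return group
--     return None
-- ===== Notes on version B (the rewrite author's own statement) =====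
-- stated objective: alternative
-- what changed: Replaces the nested full scan with running best-score tracking by a flat literal table of (keyword, group) pairs pre-ordered by keyword length descending, scanned with an early return at the first matching keyword.
import Mathlib
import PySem

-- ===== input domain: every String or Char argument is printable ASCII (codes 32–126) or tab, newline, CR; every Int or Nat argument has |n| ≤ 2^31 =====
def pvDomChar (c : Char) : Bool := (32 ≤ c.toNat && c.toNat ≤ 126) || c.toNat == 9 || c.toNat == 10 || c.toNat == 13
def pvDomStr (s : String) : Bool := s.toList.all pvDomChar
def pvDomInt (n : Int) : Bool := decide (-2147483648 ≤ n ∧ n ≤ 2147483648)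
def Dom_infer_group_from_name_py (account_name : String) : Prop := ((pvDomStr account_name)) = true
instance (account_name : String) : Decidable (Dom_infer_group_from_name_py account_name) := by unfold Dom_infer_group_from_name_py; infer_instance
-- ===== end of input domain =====

-- B replaces A's nested full scan with running best-score tracking by a flat literal
-- (keyword, group) table pre-ordered by keyword length descending and an early-exit
-- scan returning the first match; same return value (objective: alternative).

-- ===== PORT A =====
-- _GROUP_KEYWORDS: dict[str, list[str]] as an association list in insertion order
def pvGroupKeywords : List (String × List String) := [
  ("Revenue", ["revenue", "sales", "income from operations", "service income", "turnover",
               "commission received", "direct income", "indirect income"]),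
  ("Cost of Sales", ["cost of sales", "cost of goods", "cogs", "direct cost", "purchases"]),
  ("Operating Expenses", ["salary", "salaries", "wages", "rent", "depreciation", "amortization",
               "utilities", "insurance", "travel", "office", "professional fees",
               "marketing", "advertising", "communication", "repairs", "maintenance",
               "staff cost", "employee", "admin", "general expense", "operating expense"]),
  ("Current Assets", ["cash", "bank", "receivable", "inventory", "prepaid", "advance",
               "deposit", "short-term", "trade receivable", "accounts receivable"]),
  ("Non-Current Assets", ["property", "plant", "equipment", "ppe", "intangible", "goodwill",
               "investment property", "right-of-use", "long-term investment",
               "fixed asset", "capital work"]),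
  ("Current Liabilities", ["payable", "accrued", "provision", "short-term loan", "overdraft",
               "trade payable", "accounts payable", "current portion",
               "unearned revenue", "deferred revenue"]),
  ("Non-Current Liabilities", ["long-term loan", "lease liability", "bond", "debenture",
               "end of service", "employee benefit", "long-term provision"]),
  ("Equity", ["capital", "share capital", "retained earnings", "reserves",
               "accumulated", "shareholder", "owner equity", "paid-up"]),
  ("Other Income", ["other income", "interest income", "gain on", "dividend income"]),
  ("Finance Costs", ["interest expense", "finance cost", "bank charge", "finance charge"])]

def infer_group_from_name_py (account_name : String) : Option String :=
  let name_lower := PySem.Str.lower account_name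
  if PySem.Str.startswith name_lower "total" || PySem.Str.startswith name_lower "sub-total" then
    none
  else
    (pvGroupKeywords.foldl (fun st gk =>
        gk.2.foldl (fun st kw =>
          if PySem.Str.isIn kw name_lower then
            if PySem.Str.len kw > st.2 then (some gk.1, PySem.Str.len kw) else st
          else st) st)
      ((none : Option String), (0 : Int))).1

-- ===== PORT B =====
-- _KEYWORD_TABLE: flat literal (keyword, group) table, keyword length descending
def pvKeywordTable : List (String × String) := [
  ("income from operations", "Revenue"),
  ("long-term investment", "Non-Current Assets"),
  ("commission received", "Revenue"),
  ("accounts receivable", "Current Assets"),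
  ("investment property", "Non-Current Assets"),
  ("long-term provision", "Non-Current Liabilities"),
  ("professional fees", "Operating Expenses"),
  ("operating expense", "Operating Expenses"),
  ("retained earnings", "Equity"),
  ("trade receivable", "Current Assets"),
  ("accounts payable", "Current Liabilities"),
  ("unearned revenue", "Current Liabilities"),
  ("deferred revenue", "Current Liabilities"),
  ("employee benefit", "Non-Current Liabilities"),
  ("interest expense", "Finance Costs"),
  ("indirect income", "Revenue"),
  ("general expense", "Operating Expenses"),
  ("short-term loan", "Current Liabilities"),
  ("current portion", "Current Liabilities"),
  ("lease liability", "Non-Current Liabilities"),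
  ("interest income", "Other Income"),
  ("dividend income", "Other Income"),
  ("service income", "Revenue"),
  ("long-term loan", "Non-Current Liabilities"),
  ("end of service", "Non-Current Liabilities"),
  ("finance charge", "Finance Costs"),
  ("direct income", "Revenue"),
  ("cost of sales", "Cost of Sales"),
  ("cost of goods", "Cost of Sales"),
  ("communication", "Operating Expenses"),
  ("trade payable", "Current Liabilities"),
  ("share capital", "Equity"),
  ("depreciation", "Operating Expenses"),
  ("amortization", "Operating Expenses"),
  ("right-of-use", "Non-Current Assets"),
  ("capital work", "Non-Current Assets"),
  ("owner equity", "Equity"),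
  ("other income", "Other Income"),
  ("finance cost", "Finance Costs"),
  ("direct cost", "Cost of Sales"),
  ("advertising", "Operating Expenses"),
  ("maintenance", "Operating Expenses"),
  ("fixed asset", "Non-Current Assets"),
  ("accumulated", "Equity"),
  ("shareholder", "Equity"),
  ("bank charge", "Finance Costs"),
  ("staff cost", "Operating Expenses"),
  ("receivable", "Current Assets"),
  ("short-term", "Current Assets"),
  ("intangible", "Non-Current Assets"),
  ("purchases", "Cost of Sales"),
  ("utilities", "Operating Expenses"),
  ("insurance", "Operating Expenses"),
  ("marketing", "Operating Expenses"),
  ("inventory", "Current Assets"),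
  ("equipment", "Non-Current Assets"),
  ("provision", "Current Liabilities"),
  ("overdraft", "Current Liabilities"),
  ("debenture", "Non-Current Liabilities"),
  ("turnover", "Revenue"),
  ("salaries", "Operating Expenses"),
  ("employee", "Operating Expenses"),
  ("property", "Non-Current Assets"),
  ("goodwill", "Non-Current Assets"),
  ("reserves", "Equity"),
  ("revenue", "Revenue"),
  ("repairs", "Operating Expenses"),
  ("prepaid", "Current Assets"),
  ("advance", "Current Assets"),
  ("deposit", "Current Assets"),
  ("payable", "Current Liabilities"),
  ("accrued", "Current Liabilities"),
  ("capital", "Equity"),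
  ("paid-up", "Equity"),
  ("gain on", "Other Income"),
  ("salary", "Operating Expenses"),
  ("travel", "Operating Expenses"),
  ("office", "Operating Expenses"),
  ("sales", "Revenue"),
  ("wages", "Operating Expenses"),
  ("admin", "Operating Expenses"),
  ("plant", "Non-Current Assets"),
  ("cogs", "Cost of Sales"),
  ("rent", "Operating Expenses"),
  ("cash", "Current Assets"),
  ("bank", "Current Assets"),
  ("bond", "Non-Current Liabilities"),
  ("ppe", "Non-Current Assets")]

def infer_group_from_name_py_alt (account_name : String) : Option String :=
  let name_lower := PySem.Str.lower account_name
  if PySem.Str.startswith name_lower "total" || PySem.Str.startswith name_lower "sub-total" then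
    none
  else
    (pvKeywordTable.find? (fun p => PySem.Str.isIn p.1 name_lower)).map (·.2)

-- ===== PRECONDITION & SPEC =====
def Spec_infer_group_from_name_py (account_name : String) (out : Option String) : Prop := out = infer_group_from_name_py_alt account_name
instance (account_name : String) (out : Option String) : Decidable (Spec_infer_group_from_name_py account_name out) := by unfold Spec_infer_group_from_name_py; infer_instance

-- ===== CLAIM (what is proved, stated in full; the proofs are below) =====
def Claim_equal_infer_group_from_name_py : Prop := ∀ (account_name : String), Dom_infer_group_from_name_py account_name → Spec_infer_group_from_name_py account_name (infer_group_from_name_py account_name)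

-- ===== LEMMAS AND PROOFS =====

-- key on flattened pairs, reverse-sort "insert before" predicate, A's loop step (q = the match test)
def pvKey (p : String × String) : Int := PySem.Str.len p.1
def pvBef (a b : String × String) : Bool := decide (pvKey b < pvKey a)
def pvStep (q : String × String → Bool) (st : Option String × Int) (p : String × String) : Option String × Int :=
  if q p then
    if pvKey p > st.2 then (some p.2, pvKey p) else st
  else st

-- A's nested loop is the fold of pvStep over the flattened table
theorem pv_flatten (t : String) (gs : List (String × List String)) (st : Option String × Int) :
    gs.foldl (fun st gk =>
        gk.2.foldl (fun st kw =>
          if PySem.Str.isIn kw t then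
            if PySem.Str.len kw > st.2 then (some gk.1, PySem.Str.len kw) else st
          else st) st) st
      = (gs.flatMap (fun gk => gk.2.map (fun kw => (kw, gk.1)))).foldl
          (pvStep (fun p => PySem.Str.isIn p.1 t)) st := by
  induction gs generalizing st with
  | nil => rfl
  | cons gk gs ih =>
      simp only [List.foldl_cons, List.flatMap_cons, List.foldl_append, ih, List.foldl_map]
      rfl

-- non-matching pairs do not change the fold state
theorem pv_fold_filter (q : String × String → Bool) (fs : List (String × String))
    (st : Option String × Int) :
    fs.foldl (pvStep q) st = (fs.filter q).foldl (pvStep q) st := by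
  induction fs generalizing st with
  | nil => rfl
  | cons p fs ih =>
      cases h : q p <;> simp [h, ih, pvStep]

theorem pv_find?_eq_head?_filter {α : Type} (q : α → Bool) (l : List α) :
    l.find? q = (l.filter q).head? := by
  induction l with
  | nil => rfl
  | cons a l ih =>
      cases h : q a with
      | true => rw [List.find?_cons_of_pos h, List.filter_cons_of_pos h, List.head?_cons]
      | false => rw [List.find?_cons_of_neg (by simp [h]), List.filter_cons_of_neg (by simp [h]), ih]

theorem pv_insertBy_cons_true {α : Type} (bef : α → α → Bool) (x a : α) (l : List α)
    (h : bef x a = true) : PySem.List.insertBy bef x (a :: l) = x :: a :: l := by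
  simp [PySem.List.insertBy, h]

theorem pv_insertBy_cons_false {α : Type} (bef : α → α → Bool) (x a : α) (l : List α)
    (h : bef x a = false) : PySem.List.insertBy bef x (a :: l) = a :: PySem.List.insertBy bef x l := by
  simp [PySem.List.insertBy, h]

theorem pv_insertBy_all {α : Type} (bef : α → α → Bool) (x : α) (l : List α)
    (h : ∀ y ∈ l, bef x y = true) :
    PySem.List.insertBy bef x l = x :: l := by
  cases l with
  | nil => rfl
  | cons a l => exact pv_insertBy_cons_true bef x a l (h a (by simp))

-- filtering commutes with inserting into a descending-sorted accumulator
theorem pv_filter_insertBy (q : String × String → Bool) (x : String × String)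
    (acc : List (String × String)) (hacc : acc.Pairwise (fun a b => pvKey b ≤ pvKey a)) :
    (PySem.List.insertBy pvBef x acc).filter q
      = if q x then PySem.List.insertBy pvBef x (acc.filter q) else acc.filter q := by
  induction acc with
  | nil => cases hqx : q x <;> simp [PySem.List.insertBy, hqx]
  | cons a acc ih =>
      rcases List.pairwise_cons.mp hacc with ⟨ha, htail⟩
      cases hb : pvBef x a with
      | true =>
          have hlt : pvKey a < pvKey x := of_decide_eq_true hb
          rw [pv_insertBy_cons_true _ _ _ _ hb]
          cases hqx : q x with
          | true =>
              cases hqa : q a with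
              | true =>
                  simp [hqx, hqa, pv_insertBy_cons_true _ _ _ _ hb]
              | false =>
                  have hall : ∀ y ∈ acc.filter q, pvBef x y = true := by
                    intro y hy
                    have := ha y (List.mem_of_mem_filter hy)
                    exact decide_eq_true (by omega)
                  simp [hqx, hqa, pv_insertBy_all pvBef x _ hall]
          | false => simp [hqx]
      | false =>
          rw [pv_insertBy_cons_false _ _ _ _ hb]
          cases hqx : q x with
          | true =>
              cases hqa : q a with
              | true =>
                  simp [hqx, hqa, ih htail, pv_insertBy_cons_false _ _ _ _ hb]
              | false => simp [hqx, hqa, ih htail]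
          | false => simp [List.filter_cons, hqx, ih htail]

def pvSortR (ps : List (String × String)) : List (String × String) :=
  PySem.List.sorted ps (fun p => PySem.Str.len p.1) true

theorem pv_sortR_snoc (ps : List (String × String)) (x : String × String) :
    pvSortR (ps ++ [x]) = PySem.List.insertBy pvBef x (pvSortR ps) := by
  simp only [pvSortR, PySem.List.sorted_rev_eq_foldl_insertBy, List.foldl_append,
    List.foldl_cons, List.foldl_nil]
  rfl

theorem pv_sortR_pairwise (ps : List (String × String)) :
    (pvSortR ps).Pairwise (fun a b => pvKey b ≤ pvKey a) :=
  PySem.List.sorted_pairwise_rev ps (fun p => PySem.Str.len p.1)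

-- stability: filtering commutes with the descending sort
theorem pv_filter_sortR (q : String × String → Bool) (ps : List (String × String)) :
    (pvSortR ps).filter q = pvSortR (ps.filter q) := by
  induction ps using List.reverseRecOn with
  | nil => rfl
  | append_singleton ps x ih =>
      rw [pv_sortR_snoc, pv_filter_insertBy q x _ (pv_sortR_pairwise ps), List.filter_append, ih]
      cases hqx : q x with
      | true => simp [hqx, pv_sortR_snoc]
      | false => simp [hqx]

-- A's max-tracking fold over an all-matching list lands on the head of its descending sort
theorem pv_fold_eq_head (q : String × String → Bool) (fs : List (String × String))
    (h1 : ∀ p ∈ fs, q p = true)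
    (h2 : ∀ p ∈ fs, 1 ≤ pvKey p) :
    fs.foldl (pvStep q) (none, 0)
      = (match (pvSortR fs).head? with
         | none => (none, 0)
         | some p => (some p.2, pvKey p)) := by
  induction fs using List.reverseRecOn with
  | nil => rfl
  | append_singleton fs x ih =>
      have h1' : ∀ p ∈ fs, q p = true := fun p hp => h1 p (by simp [hp])
      have h2' : ∀ p ∈ fs, 1 ≤ pvKey p := fun p hp => h2 p (by simp [hp])
      have hx1 : q x = true := h1 x (by simp)
      have hx2 : 1 ≤ pvKey x := h2 x (by simp)
      rw [List.foldl_append, List.foldl_cons, List.foldl_nil, ih h1' h2', pv_sortR_snoc]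
      cases hs : (pvSortR fs) with
      | nil =>
          have hpos : (0 : Int) < pvKey x := by omega
          simp [PySem.List.insertBy, pvStep, hx1, hpos]
      | cons a rest =>
          cases hb : pvBef x a with
          | true =>
              have hlt : pvKey a < pvKey x := of_decide_eq_true hb
              rw [pv_insertBy_cons_true _ _ _ _ hb]
              simp [pvStep, hx1, hlt]
          | false =>
              have hle : ¬ (pvKey a < pvKey x) := of_decide_eq_false hb
              rw [pv_insertBy_cons_false _ _ _ _ hb]
              cases hrest : PySem.List.insertBy pvBef x rest <;>
                simp [pvStep, hx1, hle]

theorem pv_keywords_pos :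
    ∀ p ∈ pvGroupKeywords.flatMap (fun gk => gk.2.map (fun kw => (kw, gk.1))), 1 ≤ pvKey p := by
  decide

-- B's literal table is the stable length-descending sort of A's flattened table
theorem pv_table_eq :
    pvKeywordTable = pvSortR (pvGroupKeywords.flatMap (fun gk => gk.2.map (fun kw => (kw, gk.1)))) := by
  decide

-- ===== VERDICT (by name: the statement is the Claim_ definition above) =====
theorem infer_group_from_name_py_spec : Claim_equal_infer_group_from_name_py := by
  intro account_name _
  unfold Spec_infer_group_from_name_py infer_group_from_name_py infer_group_from_name_py_alt
  set t := PySem.Str.lower account_name with ht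
  show (if (PySem.Str.startswith t "total" || PySem.Str.startswith t "sub-total") = true then none
        else (pvGroupKeywords.foldl (fun st gk =>
          gk.2.foldl (fun st kw =>
            if PySem.Str.isIn kw t then
              if PySem.Str.len kw > st.2 then (some gk.1, PySem.Str.len kw) else st
            else st) st) ((none : Option String), (0 : Int))).1)
      = (if (PySem.Str.startswith t "total" || PySem.Str.startswith t "sub-total") = true then none
         else (pvKeywordTable.find? (fun p => PySem.Str.isIn p.1 t)).map (·.2))
  by_cases hg : (PySem.Str.startswith t "total" || PySem.Str.startswith t "sub-total") = true
  · rw [if_pos hg, if_pos hg]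
  · rw [if_neg hg, if_neg hg]
    rw [pv_flatten t, pv_fold_filter]
    rw [pv_fold_eq_head (fun p => PySem.Str.isIn p.1 t) _
      (fun p hp => (List.mem_filter.mp hp).2)
      (fun p hp => pv_keywords_pos p (List.mem_filter.mp hp).1)]
    rw [pv_table_eq, pv_find?_eq_head?_filter, pv_filter_sortR]
    cases (pvSortR ((pvGroupKeywords.flatMap (fun gk => gk.2.map (fun kw => (kw, gk.1)))).filter
        (fun p => PySem.Str.isIn p.1 t))).head? <;> rfl
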